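-- pv_equiv track=rewrite | github.com/ummjevel/lecture-asr | ui/progress.py | _merge_pokeball_particles
-- ===== SOURCE A (Python) =====
-- def _merge_pokeball_particles(
--     poke_lines: list[str], particle_rows: list[str]
-- ) -> list[str]:
--     """몬스터볼을 파티클 그리드 중앙에 합성한다."""
--     ph = len(poke_lines)  # 5
--     gh = len(particle_rows)  # 9
--     gw = len(particle_rows[0]) if particle_rows else 15
--
--     # 몬스터볼 시작 y (그리드 중앙)
--     y_off = max(0, (gh - ph) // 2)
--
--     merged: list[str] = []
--     for y in range(gh):
--         row = list(particle_rows[y]) if y < len(particle_rows) else [" "] * gw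
--         if y_off <= y < y_off + ph:
--             poke_row = poke_lines[y - y_off]
--             merged.append(poke_row)
--         else:
--             merged.append("".join(row))
--     return merged
-- ===== SOURCE B (Python) =====
-- def _merge_pokeball_particles(
--     poke_lines: list[str], particle_rows: list[str]
-- ) -> list[str]:
--     """Copy the particle grid, then overwrite its centre rows with the pokeball art."""
--     gh = len(particle_rows)
--     y_off = max(0, (gh - len(poke_lines)) // 2)
--     result = list(particle_rows)
--     for i, line in enumerate(poke_lines):
--         y = y_off + i
--         if y < gh:
--             result[y] = line
--     return result
-- ===== Notes on version B (the rewrite author's own statement) =====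
-- stated objective: simpler
-- what changed: B copies the particle grid once and overwrites only the centre slots with the pokeball lines (guarded by y < gh), instead of A's loop over every grid row that rebuilds each row via list()/join and carries a dead blank-row/gw path.
import Mathlib
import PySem

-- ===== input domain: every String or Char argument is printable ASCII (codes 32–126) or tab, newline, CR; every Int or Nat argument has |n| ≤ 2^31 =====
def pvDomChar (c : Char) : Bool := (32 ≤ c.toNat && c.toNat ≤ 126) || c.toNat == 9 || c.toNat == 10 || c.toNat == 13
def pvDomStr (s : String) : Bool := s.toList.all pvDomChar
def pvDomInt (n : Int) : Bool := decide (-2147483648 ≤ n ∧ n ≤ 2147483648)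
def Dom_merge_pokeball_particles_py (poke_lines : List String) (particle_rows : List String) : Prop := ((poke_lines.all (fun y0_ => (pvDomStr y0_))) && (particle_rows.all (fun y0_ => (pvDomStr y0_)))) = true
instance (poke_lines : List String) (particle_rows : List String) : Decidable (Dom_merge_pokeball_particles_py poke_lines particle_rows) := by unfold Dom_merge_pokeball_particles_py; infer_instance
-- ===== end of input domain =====

-- ===== PORT A =====
-- B replaces A's per-row rebuild loop (with its dead blank-row/gw path) by copy-then-overwrite-centre; objective: simpler.
def merge_pokeball_particles_py (poke_lines : List String) (particle_rows : List String) : List String :=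
  let ph : Int := poke_lines.length
  let gh : Int := particle_rows.length
  let gw : Int := if particle_rows ≠ [] then PySem.Str.len (PySem.List.pyGetD particle_rows 0 "") else 15
  let y_off : Int := max 0 (PySem.Int.floordiv (gh - ph) 2)
  (PySem.List.pyRange 0 gh 1).foldl (fun merged y =>
    let row : List Char :=
      if y < (particle_rows.length : Int) then (PySem.List.pyGetD particle_rows y "").toList
      else List.replicate gw.toNat ' '
    if y_off ≤ y ∧ y < y_off + ph then
      merged ++ [PySem.List.pyGetD poke_lines (y - y_off) ""]
    else
      merged ++ [String.ofList row]) []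

-- ===== PORT B =====
def merge_pokeball_particles_py_alt (poke_lines : List String) (particle_rows : List String) : List String :=
  let gh : Int := particle_rows.length
  let y_off : Int := max 0 (PySem.Int.floordiv (gh - (poke_lines.length : Int)) 2)
  (PySem.List.enumerate poke_lines).foldl (fun result p =>
    let y : Int := y_off + p.1
    if y < gh then result.set y.toNat p.2 else result) particle_rows

-- ===== PRECONDITION & SPEC =====
def Spec_merge_pokeball_particles_py (poke_lines : List String) (particle_rows : List String) (out : List String) : Prop := out = merge_pokeball_particles_py_alt poke_lines particle_rows
instance (poke_lines : List String) (particle_rows : List String) (out : List String) : Decidable (Spec_merge_pokeball_particles_py poke_lines particle_rows out) := by unfold Spec_merge_pokeball_particles_py; infer_instance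

-- ===== CLAIM (what is proved, stated in full; the proofs are below) =====
def Claim_equal_merge_pokeball_particles_py : Prop := ∀ (poke_lines : List String) (particle_rows : List String), Dom_merge_pokeball_particles_py poke_lines particle_rows → Spec_merge_pokeball_particles_py poke_lines particle_rows (merge_pokeball_particles_py poke_lines particle_rows)

-- ===== LEMMAS AND PROOFS =====

-- B's fold over `enumerate`, elementwise: positions c+s .. c+s+|xs|-1 (capped at gh) hold xs, the rest keep res.
theorem pvFoldSet_getElem? (c gh : Int) (hc : 0 ≤ c) (xs : List String) (s : Int) (hs : 0 ≤ s)
    (res : List String) (hlen : (res.length : Int) = gh) (j : Nat) :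
    ((PySem.List.enumerate xs s).foldl (fun result p =>
        if c + p.1 < gh then result.set (c + p.1).toNat p.2 else result) res)[j]? =
    if c + s ≤ (j : Int) ∧ (j : Int) < c + s + xs.length ∧ (j : Int) < gh
    then xs[(j - (c + s).toNat)]? else res[j]? := by
  induction xs generalizing s res with
  | nil =>
    rw [PySem.List.enumerate_nil, List.foldl_nil, if_neg]
    simp only [List.length_nil]
    omega
  | cons x xs ih =>
    rw [PySem.List.enumerate_cons, List.foldl_cons]
    have hlen1 : (((if c + s < gh then res.set (c+s).toNat x else res).length : Int)) = gh := by
      split <;> simp [hlen]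
    rw [ih (s+1) (by omega) _ hlen1]
    simp only [List.length_cons]
    push_cast
    split_ifs with h1 h2 h3 h4 h5 <;>
      first
      | (exfalso; omega)
      | rfl
      | skip
    · have e : j - (c + s).toNat = (j - (c + (s+1)).toNat) + 1 := by omega
      rw [e, List.getElem?_cons_succ]
    · have e0 : j - (c + s).toNat = 0 := by omega
      rw [List.getElem?_set, if_pos (by omega : (c+s).toNat = j), if_pos (by omega : (c+s).toNat < res.length), e0,
        List.getElem?_cons_zero]
    · rw [List.getElem?_set, if_neg (by omega : ¬ (c+s).toNat = j)]

-- A's row loop, as a map over the row indices (the in-range branch always fires, so the blank-row path drops out).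
theorem pvA_eq_map (poke_lines particle_rows : List String) :
    merge_pokeball_particles_py poke_lines particle_rows =
      (List.range particle_rows.length).map (fun (k : Nat) =>
        if max 0 (PySem.Int.floordiv ((particle_rows.length : Int) - (poke_lines.length : Int)) 2) ≤ (k : Int) ∧
           (k : Int) < max 0 (PySem.Int.floordiv ((particle_rows.length : Int) - (poke_lines.length : Int)) 2) + (poke_lines.length : Int)
        then PySem.List.pyGetD poke_lines ((k : Int) - max 0 (PySem.Int.floordiv ((particle_rows.length : Int) - (poke_lines.length : Int)) 2)) ""
        else particle_rows.getD k "") := by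
  show (PySem.List.pyRange 0 (particle_rows.length : Int) 1).foldl (fun merged y =>
    let row : List Char :=
      if y < (particle_rows.length : Int) then (PySem.List.pyGetD particle_rows y "").toList
      else List.replicate (if particle_rows ≠ [] then PySem.Str.len (PySem.List.pyGetD particle_rows 0 "") else 15 : Int).toNat ' '
    if max 0 (PySem.Int.floordiv ((particle_rows.length : Int) - (poke_lines.length : Int)) 2) ≤ y ∧
       y < max 0 (PySem.Int.floordiv ((particle_rows.length : Int) - (poke_lines.length : Int)) 2) + (poke_lines.length : Int) then
      merged ++ [PySem.List.pyGetD poke_lines (y - max 0 (PySem.Int.floordiv ((particle_rows.length : Int) - (poke_lines.length : Int)) 2)) ""]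
    else
      merged ++ [String.ofList row]) [] = _
  have h1 := PySem.List.foldl_congr_mem (l := PySem.List.pyRange 0 (particle_rows.length : Int) 1)
      (init := ([] : List String))
      (f := fun merged y =>
        let row : List Char :=
          if y < (particle_rows.length : Int) then (PySem.List.pyGetD particle_rows y "").toList
          else List.replicate (if particle_rows ≠ [] then PySem.Str.len (PySem.List.pyGetD particle_rows 0 "") else 15 : Int).toNat ' '
        if max 0 (PySem.Int.floordiv ((particle_rows.length : Int) - (poke_lines.length : Int)) 2) ≤ y ∧
           y < max 0 (PySem.Int.floordiv ((particle_rows.length : Int) - (poke_lines.length : Int)) 2) + (poke_lines.length : Int) then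
          merged ++ [PySem.List.pyGetD poke_lines (y - max 0 (PySem.Int.floordiv ((particle_rows.length : Int) - (poke_lines.length : Int)) 2)) ""]
        else
          merged ++ [String.ofList row])
      (g := fun merged y =>
        merged ++ [if max 0 (PySem.Int.floordiv ((particle_rows.length : Int) - (poke_lines.length : Int)) 2) ≤ y ∧
             y < max 0 (PySem.Int.floordiv ((particle_rows.length : Int) - (poke_lines.length : Int)) 2) + (poke_lines.length : Int)
           then PySem.List.pyGetD poke_lines (y - max 0 (PySem.Int.floordiv ((particle_rows.length : Int) - (poke_lines.length : Int)) 2)) ""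
           else String.ofList (PySem.List.pyGetD particle_rows y "").toList])
      (by
        intro a x hx
        rw [PySem.List.mem_pyRange_one] at hx
        simp only [if_pos hx.2]
        split <;> rfl)
  rw [h1,
    PySem.List.foldl_append_singleton_eq_map, List.nil_append, PySem.List.pyRange_one, List.map_map]
  refine List.map_congr_left (fun k hk => ?_)
  rw [List.mem_range] at hk
  simp only [Function.comp, zero_add]
  congr 1
  rw [PySem.List.pyGetD_natCast, String.ofList_toList]

theorem pvAB_eq (poke_lines particle_rows : List String) :
    merge_pokeball_particles_py poke_lines particle_rows =
      merge_pokeball_particles_py_alt poke_lines particle_rows := by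
  apply List.ext_getElem?
  intro j
  have hoff : (0:Int) ≤ max 0 (PySem.Int.floordiv ((particle_rows.length : Int) - (poke_lines.length : Int)) 2) :=
    le_max_left 0 _
  have hB : merge_pokeball_particles_py_alt poke_lines particle_rows =
      (PySem.List.enumerate poke_lines 0).foldl (fun result p =>
        if (max 0 (PySem.Int.floordiv ((particle_rows.length : Int) - (poke_lines.length : Int)) 2)) + p.1 < (particle_rows.length : Int)
        then result.set ((max 0 (PySem.Int.floordiv ((particle_rows.length : Int) - (poke_lines.length : Int)) 2)) + p.1).toNat p.2
        else result) particle_rows := rfl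
  rw [hB, pvFoldSet_getElem? _ _ hoff _ 0 le_rfl _ rfl j, pvA_eq_map, List.getElem?_map]
  by_cases hj : j < particle_rows.length
  · rw [List.getElem?_range hj]
    simp only [Option.map_some]
    by_cases hcond : (max 0 (PySem.Int.floordiv ((particle_rows.length : Int) - (poke_lines.length : Int)) 2)) ≤ (j:Int) ∧
        (j:Int) < (max 0 (PySem.Int.floordiv ((particle_rows.length : Int) - (poke_lines.length : Int)) 2)) + (poke_lines.length : Int)
    · rw [if_pos hcond, if_pos (by omega)]
      rw [PySem.List.pyGetD_eq_getElem _ _ (by omega) (by omega)]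
      rw [List.getElem?_eq_getElem (by omega)]
      congr 2
      omega
    · rw [if_neg hcond, if_neg (by omega)]
      rw [List.getElem?_eq_getElem hj]
      congr 1
      exact (List.getD_eq_getElem _ _ hj)
  · rw [List.getElem?_eq_none (by simpa using hj), if_neg (by omega),
      List.getElem?_eq_none (by omega)]
    rfl

-- ===== VERDICT (by name: the statement is the Claim_ definition above) =====
theorem merge_pokeball_particles_py_spec : Claim_equal_merge_pokeball_particles_py := by
  intro poke_lines particle_rows _
  unfold Spec_merge_pokeball_particles_py
  exact pvAB_eq poke_lines particle_rows
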